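-- pv_equiv track=rewrite | github.com/EricMaibach/BioInfoProject2 | Pairwise.py | ScoreTriplet
-- ===== SOURCE A (Python) =====
-- def ScoreTriplet(sarstriplet, covidtriplet):
--     score = {
--         "SynCount": 0,
--         "NonsynCount": 0,
--         "IndelCount": 0
--     }
--     if "_" in covidtriplet:
--         gapindexes = [i for i, ltr in enumerate(covidtriplet) if ltr == "_"]
--         if len(gapindexes) == 3:
--             score["IndelCount"] = 1
--         elif len(gapindexes) == 1:
--             score["IndelCount"] = 1
--         else:
--             if 1 in gapindexes:
--                 score["IndelCount"] = 1
--             else: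
--                 score["IndelCount"] = 2
--     elif "_" in sarstriplet:
--         gapindexes = [i for i, ltr in enumerate(sarstriplet) if ltr == "_"]
--         if len(gapindexes) == 3:
--             score["IndelCount"] = 1
--         elif len(gapindexes) == 1:
--             score["IndelCount"] = 1
--         else:
--             if 1 in gapindexes:
--                 score["IndelCount"] = 1
--             else:
--                 score["IndelCount"] = 2
--     elif sarstriplet != covidtriplet:
--         protdict = {
--             'ATA':'I', 'ATC':'I', 'ATT':'I', 'ATG':'M',
--             'ACA':'T', 'ACC':'T', 'ACG':'T', 'ACT':'T',
--             'AAC':'N', 'AAT':'N', 'AAA':'K', 'AAG':'K',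
--             'AGC':'S', 'AGT':'S', 'AGA':'R', 'AGG':'R',
--             'CTA':'L', 'CTC':'L', 'CTG':'L', 'CTT':'L',
--             'CCA':'P', 'CCC':'P', 'CCG':'P', 'CCT':'P',
--             'CAC':'H', 'CAT':'H', 'CAA':'Q', 'CAG':'Q',
--             'CGA':'R', 'CGC':'R', 'CGG':'R', 'CGT':'R',
--             'GTA':'V', 'GTC':'V', 'GTG':'V', 'GTT':'V',
--             'GCA':'A', 'GCC':'A', 'GCG':'A', 'GCT':'A',
--             'GAC':'D', 'GAT':'D', 'GAA':'E', 'GAG':'E',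
--             'GGA':'G', 'GGC':'G', 'GGG':'G', 'GGT':'G',
--             'TCA':'S', 'TCC':'S', 'TCG':'S', 'TCT':'S',
--             'TTC':'F', 'TTT':'F', 'TTA':'L', 'TTG':'L',
--             'TAC':'Y', 'TAT':'Y', 'TAA':'_', 'TAG':'_',
--             'TGC':'C', 'TGT':'C', 'TGA':'_', 'TGG':'W',
--         }
--         if protdict[sarstriplet] != protdict[covidtriplet]:
--             score["SynCount"] = 1
--         else:
--             score["NonsynCount"] = 1
--
--     return score
-- ===== SOURCE B (Python) =====
-- # Gap scoring by one recursive left-to-right scan (accumulating gap count and a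
-- # middle-gap flag) instead of an index-list comprehension plus len/membership
-- # dispatch; codon translation by arithmetic base-4 indexing into a packed
-- # 64-character protein string instead of a 64-entry dict.
--
-- _PROT = "KNKNTTTTRSRSIIMIQHQHPPPPRRRRLLLLEDEDAAAAGGGGVVVV_Y_YSSSS_CWCLFLF"
--
--
-- def _aa(codon):
--     i = 0
--     for ch in codon:
--         i = 4 * i + "ACGT".index(ch)
--     return _PROT[i]
--
--
-- def _indels(chars, i, count, middle):
--     if not chars:
--         return 1 if count in (1, 3) or middle else 2
--     ch = chars[0]
--     return _indels(chars[1:], i + 1, count + (ch == "_"), middle or (i == 1 and ch == "_"))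
--
--
-- def ScoreTriplet(sarstriplet, covidtriplet):
--     score = dict.fromkeys(("SynCount", "NonsynCount", "IndelCount"), 0)
--     gapped = covidtriplet if "_" in covidtriplet else sarstriplet if "_" in sarstriplet else None
--     if gapped is not None:
--         score["IndelCount"] = _indels(gapped, 0, 0, False)
--     elif sarstriplet != covidtriplet:
--         score["SynCount" if _aa(sarstriplet) != _aa(covidtriplet) else "NonsynCount"] = 1
--     return score
-- ===== Notes on version B (the rewrite author's own statement) =====
-- stated objective: alternative
-- what changed: B replaces A's duplicated enumerate/index-list gap branches with one recursive single-pass scan accumulating a gap count and a middle-gap flag, and replaces the 64-entry codon dict lookup with arithmetic base-4 indexing into a packed 64-character protein string.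
import Mathlib
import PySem

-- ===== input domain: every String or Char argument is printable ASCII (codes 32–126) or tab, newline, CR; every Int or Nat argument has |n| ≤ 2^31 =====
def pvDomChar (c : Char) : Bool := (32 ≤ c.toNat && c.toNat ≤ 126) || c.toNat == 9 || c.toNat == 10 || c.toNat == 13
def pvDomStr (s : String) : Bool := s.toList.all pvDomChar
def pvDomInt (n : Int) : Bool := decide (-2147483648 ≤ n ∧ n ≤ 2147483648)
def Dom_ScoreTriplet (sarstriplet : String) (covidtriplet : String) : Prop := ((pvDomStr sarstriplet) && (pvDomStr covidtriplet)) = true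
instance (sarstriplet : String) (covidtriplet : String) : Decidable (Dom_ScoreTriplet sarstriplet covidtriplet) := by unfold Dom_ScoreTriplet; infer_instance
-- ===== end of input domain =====

-- B scores gaps by one recursive scan (gap count + middle-gap flag) instead of A's duplicated
-- enumerate/index-list branches, and translates codons by base-4 arithmetic indexing into a
-- packed 64-character string instead of a 64-entry dict (objective: alternative).

-- ===== PORT A =====
-- the codon table A writes out literally
def pvProtDict : PySem.Dict String String := PySem.Dict.ofList [
  ("ATA","I"), ("ATC","I"), ("ATT","I"), ("ATG","M"),
  ("ACA","T"), ("ACC","T"), ("ACG","T"), ("ACT","T"),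
  ("AAC","N"), ("AAT","N"), ("AAA","K"), ("AAG","K"),
  ("AGC","S"), ("AGT","S"), ("AGA","R"), ("AGG","R"),
  ("CTA","L"), ("CTC","L"), ("CTG","L"), ("CTT","L"),
  ("CCA","P"), ("CCC","P"), ("CCG","P"), ("CCT","P"),
  ("CAC","H"), ("CAT","H"), ("CAA","Q"), ("CAG","Q"),
  ("CGA","R"), ("CGC","R"), ("CGG","R"), ("CGT","R"),
  ("GTA","V"), ("GTC","V"), ("GTG","V"), ("GTT","V"),
  ("GCA","A"), ("GCC","A"), ("GCG","A"), ("GCT","A"),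
  ("GAC","D"), ("GAT","D"), ("GAA","E"), ("GAG","E"),
  ("GGA","G"), ("GGC","G"), ("GGG","G"), ("GGT","G"),
  ("TCA","S"), ("TCC","S"), ("TCG","S"), ("TCT","S"),
  ("TTC","F"), ("TTT","F"), ("TTA","L"), ("TTG","L"),
  ("TAC","Y"), ("TAT","Y"), ("TAA","_"), ("TAG","_"),
  ("TGC","C"), ("TGT","C"), ("TGA","_"), ("TGG","W")]

-- the gap branch A writes out twice: gapindexes comprehension, then the len/membership dispatch
def pvGapBranchA (score : PySem.Dict String Int) (triplet : String) : PySem.Dict String Int :=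
  let gapindexes := ((PySem.List.enumerate triplet.toList 0).filter (fun p => p.2 == '_')).map (·.1)
  if gapindexes.length == 3 then score.insert "IndelCount" 1
  else if gapindexes.length == 1 then score.insert "IndelCount" 1
  else if gapindexes.contains (1 : Int) then score.insert "IndelCount" 1
  else score.insert "IndelCount" 2

def ScoreTriplet (sarstriplet : String) (covidtriplet : String) : List (String × Int) :=
  let score : PySem.Dict String Int :=
    PySem.Dict.ofList [("SynCount", 0), ("NonsynCount", 0), ("IndelCount", 0)]
  if PySem.Str.isIn "_" covidtriplet then
    (pvGapBranchA score covidtriplet).items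
  else if PySem.Str.isIn "_" sarstriplet then
    (pvGapBranchA score sarstriplet).items
  else if sarstriplet ≠ covidtriplet then
    -- protdict[x] raises KeyError on a missing key (excluded by Pre_); .getD "" there
    let score :=
      if (pvProtDict.get? sarstriplet).getD "" ≠ (pvProtDict.get? covidtriplet).getD "" then
        score.insert "SynCount" 1
      else
        score.insert "NonsynCount" 1
    score.items
  else
    score.items

-- ===== PORT B =====
def pvPROT : String := "KNKNTTTTRSRSIIMIQHQHPPPPRRRRLLLLEDEDAAAAGGGGVVVV_Y_YSSSS_CWCLFLF"

-- Source B's _aa: base-4 index accumulated by a for-loop, then _PROT[i]; "ACGT".index and the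
-- final indexing raise on non-codons (excluded by Pre_), modelled by Option (none = raise)
def pvAA? (codon : String) : Option Char :=
  match codon.toList.foldl
      (fun acc ch =>
        match acc, PySem.List.index? "ACGT".toList ch with
        | some i, some d => some (4 * i + (d : Int))
        | _, _ => none)
      (some (0 : Int)) with
  | some i => PySem.Str.pyGet? pvPROT i
  | none => none

-- Source B's _indels: recursive scan carrying the running gap count and the middle-gap flag
def pvIndels : List Char → Int → Int → Bool → Int
  | [], _, count, middle => if count == 1 || count == 3 || middle then 1 else 2
  | ch :: rest, i, count, middle =>
      pvIndels rest (i + 1) (count + (if ch == '_' then 1 else 0))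
        (middle || (i == 1 && ch == '_'))

def ScoreTriplet_alt (sarstriplet : String) (covidtriplet : String) : List (String × Int) :=
  let score : PySem.Dict String Int :=
    PySem.Dict.ofList [("SynCount", 0), ("NonsynCount", 0), ("IndelCount", 0)]
  let gapped : Option String :=
    if PySem.Str.isIn "_" covidtriplet then some covidtriplet
    else if PySem.Str.isIn "_" sarstriplet then some sarstriplet
    else none
  match gapped with
  | some g => (score.insert "IndelCount" (pvIndels g.toList 0 0 false)).items
  | none =>
    if sarstriplet ≠ covidtriplet then
      (score.insert
        (if pvAA? sarstriplet ≠ pvAA? covidtriplet then "SynCount" else "NonsynCount")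
        1).items
    else
      score.items

-- ===== PRECONDITION & SPEC =====
-- the 64 keys of A's codon table
def pvCodons : List String :=
  ["ATA","ATC","ATT","ATG","ACA","ACC","ACG","ACT","AAC","AAT","AAA","AAG",
   "AGC","AGT","AGA","AGG","CTA","CTC","CTG","CTT","CCA","CCC","CCG","CCT",
   "CAC","CAT","CAA","CAG","CGA","CGC","CGG","CGT","GTA","GTC","GTG","GTT",
   "GCA","GCC","GCG","GCT","GAC","GAT","GAA","GAG","GGA","GGC","GGG","GGT",
   "TCA","TCC","TCG","TCT","TTC","TTT","TTA","TTG","TAC","TAT","TAA","TAG",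
   "TGC","TGT","TGA","TGG"]

-- Pre_ excludes exactly the inputs where A raises KeyError: no gap in either string, the
-- strings differ, and one of them is not a codon-table key.
def Pre_ScoreTriplet (sarstriplet : String) (covidtriplet : String) : Prop :=
  PySem.Str.isIn "_" covidtriplet = true ∨ PySem.Str.isIn "_" sarstriplet = true ∨
  sarstriplet = covidtriplet ∨
  (sarstriplet ∈ pvCodons ∧ covidtriplet ∈ pvCodons)
instance (sarstriplet : String) (covidtriplet : String) : Decidable (Pre_ScoreTriplet sarstriplet covidtriplet) := by unfold Pre_ScoreTriplet; infer_instance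

def pvWitness_ScoreTriplet : String × String := ("A_C", "A_C")

def Spec_ScoreTriplet (sarstriplet : String) (covidtriplet : String) (out : List (String × Int)) : Prop := out = ScoreTriplet_alt sarstriplet covidtriplet
instance (sarstriplet : String) (covidtriplet : String) (out : List (String × Int)) : Decidable (Spec_ScoreTriplet sarstriplet covidtriplet out) := by unfold Spec_ScoreTriplet; infer_instance

-- ===== CLAIM (what is proved, stated in full; the proofs are below) =====
def Claim_equal_ScoreTriplet : Prop := ∀ (sarstriplet : String) (covidtriplet : String), Dom_ScoreTriplet sarstriplet covidtriplet → Pre_ScoreTriplet sarstriplet covidtriplet → Spec_ScoreTriplet sarstriplet covidtriplet (ScoreTriplet sarstriplet covidtriplet)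

-- ===== LEMMAS AND PROOFS =====

-- A's gapindexes has as many entries as the string has gap characters
theorem pv_len_gapidx (cs : List Char) (s : Int) :
    (((PySem.List.enumerate cs s).filter (fun p => p.2 == '_')).map (·.1)).length
      = cs.countP (· == '_') := by
  induction cs generalizing s with
  | nil => rfl
  | cons a t ih =>
      rw [PySem.List.enumerate_cons]
      by_cases h : a == '_' <;> simp [h, ih]

-- indices produced by enumerate from 2 on are never 1
theorem pv_no_one (t : List Char) (x : Char) : ¬ ((1:Int), x) ∈ PySem.List.enumerate t 2 := by
  rw [PySem.List.mem_enumerate_iff]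
  rintro ⟨k, hk, h⟩
  have := congrArg Prod.fst h
  simp at this; omega

-- membership of index 1 in A's gapindexes is a positional test
theorem pv_mem_gapidx (cs : List Char) :
    (((PySem.List.enumerate cs 0).filter (fun p => p.2 == '_')).map (·.1)).contains (1 : Int)
      = (cs[1]? == some '_') := by
  rcases cs with _ | ⟨a, _ | ⟨b, t⟩⟩
  · rfl
  · by_cases h : a = '_' <;> simp [PySem.List.enumerate_cons, h]
  · by_cases ha : a = '_' <;> by_cases hb : b = '_' <;>
      simp only [PySem.List.enumerate_cons, List.filter_cons, List.getElem?_cons_succ,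
        List.getElem?_cons_zero, ha, hb] <;>
      simp [ha, hb, pv_no_one t]

-- once the scan is past index 1, only the final count and the saved flag matter
theorem pv_ind_tail (cs : List Char) : ∀ (i cnt : Int) (mid : Bool), 2 ≤ i →
    pvIndels cs i cnt mid
      = if cnt + (cs.countP (· == '_') : Int) == 1
           || cnt + (cs.countP (· == '_') : Int) == 3 || mid then 1 else 2 := by
  induction cs with
  | nil => intro i cnt mid _; simp [pvIndels]
  | cons c rest ih =>
      intro i cnt mid hi
      have h1 : (i == 1) = false := by simp; omega
      rw [pvIndels, h1]
      rw [ih (i + 1) _ _ (by omega)]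
      by_cases hc : c = '_' <;> simp [hc] <;> ring_nf

-- the two if-chains dispatch to the same value
theorem pv_dispatch (n : Int) (m : Bool) :
    (if n == 1 || n == 3 || m then (1:Int) else 2)
      = (if n == 3 then 1 else if n == 1 then 1 else if m then 1 else 2) := by
  by_cases h1 : n = 1 <;> by_cases h3 : n = 3 <;> cases m <;> simp [h1, h3]

-- B's recursive scan computes exactly A's gap dispatch value
theorem pv_ind_eq (cs : List Char) :
    pvIndels cs 0 0 false
      = (if ((((PySem.List.enumerate cs 0).filter (fun p => p.2 == '_')).map (·.1)).length == 3)
           then 1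
         else if ((((PySem.List.enumerate cs 0).filter (fun p => p.2 == '_')).map (·.1)).length == 1)
           then 1
         else if (((PySem.List.enumerate cs 0).filter (fun p => p.2 == '_')).map (·.1)).contains (1 : Int)
           then 1
         else 2) := by
  rw [pv_len_gapidx, pv_mem_gapidx]
  rcases cs with _ | ⟨a, _ | ⟨b, t⟩⟩
  · rfl
  · by_cases h : a = '_' <;> simp [pvIndels, h]
  · rw [pvIndels, pvIndels, pv_ind_tail t (0 + 1 + 1) _ _ (by omega)]
    have hkey : ((0:Int) + (if a == '_' then (1:Int) else 0) + (if b == '_' then (1:Int) else 0))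
        + (t.countP (· == '_') : Int) = ((a :: b :: t).countP (· == '_') : Int) := by
      by_cases ha : a = '_' <;> by_cases hb : b = '_' <;> simp [ha, hb] <;> ring
    have hm : (false || (0:Int) == 1 && a == '_' || (0:Int) + 1 == 1 && b == '_') = (b == '_') := by
      by_cases hb : b = '_' <;> simp [hb]
    rw [hm, hkey, pv_dispatch]
    simp
    norm_cast

-- evaluated Dict plumbing: items after one targeted insert into the literal score dict
theorem pv_items_indel (v : Int) :
    ((PySem.Dict.ofList [("SynCount", (0:Int)), ("NonsynCount", 0), ("IndelCount", 0)]).insert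
        "IndelCount" v).items
      = [("SynCount", 0), ("NonsynCount", 0), ("IndelCount", v)] := rfl

-- A's gap branch, evaluated: one targeted insert into the literal score dict
theorem pv_gapA_items (t : String) :
    (pvGapBranchA (PySem.Dict.ofList [("SynCount", (0:Int)), ("NonsynCount", 0), ("IndelCount", 0)]) t).items
      = [("SynCount", 0), ("NonsynCount", 0), ("IndelCount",
          if ((((PySem.List.enumerate t.toList 0).filter (fun p => p.2 == '_')).map (·.1)).length == 3)
            then 1
          else if ((((PySem.List.enumerate t.toList 0).filter (fun p => p.2 == '_')).map (·.1)).length == 1)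
            then 1
          else if (((PySem.List.enumerate t.toList 0).filter (fun p => p.2 == '_')).map (·.1)).contains (1 : Int)
            then 1
          else 2)] := by
  simp only [pvGapBranchA]
  split_ifs <;> rfl

-- the packed-string translation agrees with A's dict on every codon key (checked by decide)
theorem pv_aa_table :
    (pvCodons.all (fun k =>
      ((pvProtDict.get? k).getD "" == String.ofList [(pvAA? k).getD ' '])
        && (pvAA? k).isSome)) = true := by
  set_option maxRecDepth 100000 in decide

theorem pv_aa_key (k : String) (hk : k ∈ pvCodons) :
    (pvProtDict.get? k).getD "" = String.ofList [(pvAA? k).getD ' '] ∧ (pvAA? k).isSome := by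
  have := List.all_eq_true.mp pv_aa_table k hk
  simp only [Bool.and_eq_true, beq_iff_eq] at this
  exact this

-- on codon keys, A's amino-acid inequality test is B's
theorem pv_aa_test (s c : String) (hs : s ∈ pvCodons) (hc : c ∈ pvCodons) :
    ((pvProtDict.get? s).getD "" ≠ (pvProtDict.get? c).getD "")
      ↔ (pvAA? s ≠ pvAA? c) := by
  obtain ⟨hs1, hs2⟩ := pv_aa_key s hs
  obtain ⟨hc1, hc2⟩ := pv_aa_key c hc
  rw [hs1, hc1]
  rw [Option.isSome_iff_exists] at hs2 hc2
  obtain ⟨x, hx⟩ := hs2; obtain ⟨y, hy⟩ := hc2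
  rw [hx, hy]
  simp [String.ext_iff]

-- ===== VERDICT (by name: the statement is the Claim_ definition above) =====
theorem ScoreTriplet_spec : Claim_equal_ScoreTriplet := by
  intro sars covid _ hpre
  unfold Spec_ScoreTriplet ScoreTriplet ScoreTriplet_alt
  by_cases hc : PySem.Str.isIn "_" covid
  · simp only [hc, if_pos]
    rw [pv_items_indel, pv_ind_eq, pv_gapA_items]
  · by_cases hs : PySem.Str.isIn "_" sars
    · simp only [hc, hs, Bool.false_eq_true, if_false, if_true]
      rw [pv_items_indel, pv_ind_eq, pv_gapA_items]
    · simp only [hc, hs, Bool.false_eq_true, if_false]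
      by_cases heq : sars = covid
      · simp [heq]
      · rcases hpre with h | h | h | ⟨hks, hkc⟩
        · exact absurd h hc
        · exact absurd h hs
        · exact absurd h heq
        · simp only [heq, ne_eq, not_false_eq_true, if_true]
          by_cases hne : (pvProtDict.get? sars).getD "" ≠ (pvProtDict.get? covid).getD ""
          · have hb : pvAA? sars ≠ pvAA? covid := (pv_aa_test sars covid hks hkc).mp hne
            simp only [hne, hb, not_false_eq_true, if_true]
          · have hb : ¬ (pvAA? sars ≠ pvAA? covid) := fun h =>
              hne ((pv_aa_test sars covid hks hkc).mpr h)
            simp only [hne, hb, if_false]
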